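-- pv_equiv track=rewrite | github.com/PanayiotaK/Error-Correcting-Codes | Ass.py | message
-- ===== SOURCE A (Python) =====
-- def valid_inp(p):
--     if len(p)==0:
--         return False
--     for i in range(len(p)):
--         if p[i]!=0 and p[i]!=1:
--             return False
--
--     else:
--         return True
--
-- def decimalToVector(n,r):
--     v = []
--     for s in range(r):
--         v.insert(0,n%2)
--         n //= 2
--     return v
--
-- def message(a):
--     if valid_inp(a):
--         m=[]
--         r=2
--         k=2**r-r-1
--         while k-r<len(a):
--             r+=1
--             k=2**r-r-1
--         len_bin=decimalToVector(len(a),r)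
--         m.extend(len_bin)
--         m.extend(a)
--         for i in range(r+len(a),k):
--             m.append(0)
--         return m
--     else:
--         return []
-- ===== SOURCE B (Python) =====
-- def _min_r(n, r):
--     return r if n + 2 * r + 1 <= 2 ** r else _min_r(n, r + 1)
--
-- def message(a):
--     n = len(a)
--     if n == 0 or not set(a) <= {0, 1}:
--         return []
--     r = _min_r(n, 2)
--     k = 2 ** r - r - 1
--     return [(n >> (r - 1 - i)) & 1 if i < r else a[i - r] if i < r + n else 0
--             for i in range(k)]
-- ===== Notes on version B (the rewrite author's own statement) =====
-- stated objective: alternative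
-- what changed: B validates via a set-subset test, finds r by a recursive helper instead of the while loop, and generates the whole codeword in a single position-indexed comprehension (header bit by shift/mask, data by index, pad by default) instead of A's staged extend/append construction with the insert-front halving loop.
import Mathlib
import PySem

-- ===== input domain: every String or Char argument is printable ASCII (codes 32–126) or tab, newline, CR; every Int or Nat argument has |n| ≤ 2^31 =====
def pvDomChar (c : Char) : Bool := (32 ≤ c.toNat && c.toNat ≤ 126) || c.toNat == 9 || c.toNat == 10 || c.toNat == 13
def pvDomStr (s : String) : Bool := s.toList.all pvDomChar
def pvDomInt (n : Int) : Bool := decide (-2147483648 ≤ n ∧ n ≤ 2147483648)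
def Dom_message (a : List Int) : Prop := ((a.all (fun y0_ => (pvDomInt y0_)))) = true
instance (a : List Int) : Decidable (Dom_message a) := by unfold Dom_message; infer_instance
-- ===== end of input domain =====

-- B is a different decomposition (no speed claim): set-subset validation, recursive r-search,
-- and the codeword generated in one position-indexed comprehension instead of staged appends.

-- ===== PORT A =====
def validAux : List Int → Bool
  | [] => true
  | x :: xs => if x != 0 && x != 1 then false else validAux xs

def valid_inp (p : List Int) : Bool :=
  if p.length == 0 then false else validAux p

def decimalToVector (n : Int) (r : Nat) : List Int :=
  match r with
  | 0 => []
  | Nat.succ s => decimalToVector (PySem.Int.floordiv n 2) s ++ [PySem.Int.mod n 2]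

-- while k - r < len(a): r += 1; k = 2**r - r - 1   (k is 2^r - r - 1 at every test);
-- structural recursion on a fuel that provably exceeds the number of iterations (the loop itself is unchanged)
def loopA (n : Nat) : Nat → Nat → Nat
  | 0, r => r
  | Nat.succ f, r => if ((2 : Int) ^ r - r - 1) - r < (n : Int) then loopA n f (r + 1) else r

def findR_A (n : Nat) (r : Nat) : Nat := loopA n (n + 3) r

def message (a : List Int) : List Int :=
  if valid_inp a then
    let r := findR_A a.length 2
    let k : Int := 2 ^ r - r - 1
    let len_bin := decimalToVector (a.length : Int) r
    (PySem.List.pyRange ((r : Int) + a.length) k 1).foldl (fun m _ => m ++ [0]) (len_bin ++ a)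
  else []

-- ===== PORT B =====
-- _min_r(n, r): return r if n + 2*r + 1 <= 2**r else _min_r(n, r+1)   (all quantities
-- nonnegative); same fuel device as loopA to make the recursion structural
def loopB (n : Nat) : Nat → Nat → Nat
  | 0, r => r
  | Nat.succ f, r => if n + 2 * r + 1 ≤ 2 ^ r then r else loopB n f (r + 1)

def minR (n : Nat) (r : Nat) : Nat := loopB n (n + 3) r

def message_alt (a : List Int) : List Int :=
  let n := a.length
  if n == 0 || !(PySem.Set.issubset (PySem.Set.ofList a) (PySem.Set.ofList [0, 1])) then []
  else
    let r := minR n 2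
    let k := 2 ^ r - r - 1   -- Nat subtraction exact here: 2^r ≥ r + 1 since r ≥ 2
    (List.range k).map (fun i =>
      if i < r then (((n >>> (r - 1 - i)) &&& 1 : Nat) : Int)
      else if i < r + n then a.getD (i - r) 0   -- a[i - r], index provably in range
      else 0)

-- ===== PRECONDITION & SPEC =====
def Spec_message (a : List Int) (out : List Int) : Prop := out = message_alt a
instance (a : List Int) (out : List Int) : Decidable (Spec_message a out) := by unfold Spec_message; infer_instance

-- ===== CLAIM (what is proved, stated in full; the proofs are below) =====
def Claim_equal_message : Prop := ∀ (a : List Int), Dom_message a → Spec_message a (message a)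

-- ===== LEMMAS AND PROOFS =====

theorem loopB_post (n : Nat) : ∀ (f r : Nat),
    (∃ s, r ≤ s ∧ s ≤ r + f ∧ n + 2 * s + 1 ≤ 2 ^ s) →
    r ≤ loopB n f r ∧ n + 2 * loopB n f r + 1 ≤ 2 ^ loopB n f r := by
  intro f
  induction f with
  | zero =>
    intro r ⟨s, h1, h2, h3⟩
    have : s = r := by omega
    subst this
    exact ⟨le_refl _, by simpa [loopB] using h3⟩
  | succ f ih =>
    intro r ⟨s, h1, h2, h3⟩
    by_cases hc : n + 2 * r + 1 ≤ 2 ^ r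
    · simp only [loopB, if_pos hc]
      exact ⟨le_refl _, hc⟩
    · simp only [loopB, if_neg hc]
      have hs : r + 1 ≤ s := by
        rcases Nat.lt_or_ge r s with h | h
        · omega
        · have : s = r := by omega
          subst this
          exact absurd h3 hc
      obtain ⟨hle, hpost⟩ := ih (r + 1) ⟨s, hs, by omega, h3⟩
      exact ⟨by omega, hpost⟩

theorem minR_post (n : Nat) : 2 ≤ minR n 2 ∧ n + 2 * minR n 2 + 1 ≤ 2 ^ minR n 2 := by
  apply loopB_post
  refine ⟨n + 5, by omega, by omega, ?_⟩
  have h1 : n < 2 ^ n := Nat.lt_two_pow_self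
  have h2 : 2 ^ (n + 5) = 32 * 2 ^ n := by ring
  omega

theorem loop_eq (n : Nat) : ∀ (f r : Nat), loopA n f r = loopB n f r := by
  intro f
  induction f with
  | zero => intro r; rfl
  | succ f ih =>
    intro r
    have hiff : (((2 : Int) ^ r - r - 1) - r < (n : Int)) ↔ ¬ (n + 2 * r + 1 ≤ 2 ^ r) := by
      have h2r : ((2 : Int)) ^ r = ((2 ^ r : Nat) : Int) := by push_cast; ring
      rw [h2r]
      omega
    simp only [loopA, loopB]
    by_cases hc : n + 2 * r + 1 ≤ 2 ^ r
    · rw [if_neg (by rw [hiff]; exact not_not_intro hc), if_pos hc]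
    · rw [if_pos (hiff.mpr hc), if_neg hc, ih]

theorem findR_eq (n r : Nat) : findR_A n r = minR n r := loop_eq n (n + 3) r

theorem validAux_eq (xs : List Int) :
    validAux xs = !(xs.any fun x => x != 0 && x != 1) := by
  induction xs with
  | nil => rfl
  | cons x xs ih =>
    simp only [validAux, List.any_cons]
    cases hx : (x != 0 && x != 1) <;> simp [ih]

theorem issubset_ofList_01 (a : List Int) :
    PySem.Set.issubset (PySem.Set.ofList a) (PySem.Set.ofList [0, 1])
      = a.all (fun x => !(x != 0 && x != 1)) := by
  simp only [PySem.Set.issubset, List.all_eq, decide_eq_decide]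
  constructor
  all_goals intro h x hx
  · have := h x ((PySem.Set.mem_ofList a x).mpr hx)
    revert this
    simp only [PySem.Set.contains]
    rcases em (x = 0) with h0 | h0 <;> rcases em (x = 1) with h1 | h1 <;> simp [h0, h1]
  · have hx' := (PySem.Set.mem_ofList a x).mp hx
    have := h x hx'
    revert this
    simp only [PySem.Set.contains]
    rcases em (x = 0) with h0 | h0 <;> rcases em (x = 1) with h1 | h1 <;> simp [h0, h1]

theorem any_not_all (a : List Int) :
    (a.any fun x => x != 0 && x != 1) = !(a.all fun x => !(x != 0 && x != 1)) := by
  induction a with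
  | nil => rfl
  | cons x xs ih => cases h : (x != 0 && x != 1) <;> simp [h, ih]

theorem foldl_append_zeros (l : List Int) (acc : List Int) :
    l.foldl (fun m _ => m ++ [0]) acc = acc ++ List.replicate l.length 0 := by
  induction l generalizing acc with
  | nil => simp
  | cons x xs ih =>
    simp only [List.foldl_cons, ih, List.length_cons, List.append_assoc,
      List.replicate_succ, List.singleton_append]

-- decimalToVector (insert-front halving loop) = bit extraction by shift and mask
theorem hdr_eq (r : Nat) : ∀ n : Nat, decimalToVector (n : Int) r =
    (List.range r).map (fun i => (((n >>> (r - 1 - i)) &&& 1 : Nat) : Int)) := by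
  induction r with
  | zero => intro n; rfl
  | succ s ih =>
    intro n
    rw [List.range_succ, List.map_append]
    have hfd : PySem.Int.floordiv (n : Int) 2 = ((n / 2 : Nat) : Int) := by
      exact_mod_cast PySem.Int.floordiv_natCast n 2
    simp only [decimalToVector, hfd, ih (n / 2)]
    congr 1
    · apply List.map_congr_left
      intro i hi
      simp only [List.mem_range] at hi
      congr 1
      rw [Nat.shiftRight_eq_div_pow, Nat.shiftRight_eq_div_pow,
        Nat.div_div_eq_div_mul]
      congr 2
      rw [← pow_succ']
      congr 1
      omega
    · simp only [List.map_cons, List.map_nil]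
      congr 1
      have h0 : s + 1 - 1 - s = 0 := by omega
      rw [h0, Nat.shiftRight_zero, Nat.and_one_is_mod]
      exact_mod_cast PySem.Int.mod_natCast n 2

theorem map_getD_range (a : List Int) :
    (List.range a.length).map (fun j => a.getD j 0) = a := by
  apply List.ext_getElem
  · simp
  · intro i h1 h2
    simp [List.getD, List.getElem?_eq_getElem h2]

-- ===== VERDICT (by name: the statement is the Claim_ definition above) =====
theorem message_spec : Claim_equal_message := by
  intro a _dom
  unfold Spec_message message message_alt
  unfold valid_inp
  rw [issubset_ofList_01]
  by_cases h0 : a.length = 0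
  · simp [h0]
  · have hl : (a.length == 0) = false := by simp [h0]
    rw [hl]
    simp only [Bool.false_eq_true, if_false]
    cases hall : (a.all fun x => !(x != 0 && x != 1)) with
    | false =>
      have : validAux a = false := by rw [validAux_eq, any_not_all, hall]; rfl
      simp [this]
    | true =>
      have hv : validAux a = true := by rw [validAux_eq, any_not_all, hall]; rfl
      simp only [hv, if_true, Bool.not_true, Bool.or_false, hl, Bool.false_eq_true,
        if_false]
      rw [findR_eq, foldl_append_zeros, PySem.List.length_pyRange_one, hdr_eq]
      set n := a.length with hn
      set r := minR n 2 with hr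
      obtain ⟨hr2, hcap⟩ := minR_post n
      rw [← hr] at hr2 hcap
      have h2r : ((2 : Int)) ^ r = ((2 ^ r : Nat) : Int) := by push_cast; ring
      have hk : 2 ^ r - r - 1 = r + n + (2 ^ r - r - 1 - r - n) := by omega
      have htoNat : (((2 : Int) ^ r - r - 1 - ((r : Int) + n)).toNat) = 2 ^ r - r - 1 - r - n := by
        rw [h2r]; omega
      rw [htoNat, hk, List.range_add, List.range_add, List.map_append, List.map_append,
        List.map_map, List.map_map]
      congr 1
      · congr 1
        · apply List.map_congr_left
          intro i hi
          simp only [List.mem_range] at hi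
          rw [if_pos hi]
        · -- middle segment: the data a itself
          conv_lhs => rw [← map_getD_range a, ← hn]
          apply List.map_congr_left
          intro j hj
          simp only [List.mem_range] at hj
          simp only [Function.comp]
          rw [if_neg (by omega), if_pos (by omega)]
          congr 1
          omega
      · -- tail segment: zeros
        rw [show List.replicate (r + n + (2 ^ r - r - 1 - r - n) - r - n) (0 : Int)
              = (List.range (2 ^ r - r - 1 - r - n)).map (fun _ => (0 : Int)) by
            rw [List.map_const', List.length_range]; congr 1; omega]
        apply List.map_congr_left
        intro j _
        simp only [Function.comp]
        rw [if_neg (by omega), if_neg (by omega)]
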